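-- pv_equiv track=rewrite | github.com/aliceheiman/morse-trainer | util.py | get_symbol_message
-- ===== SOURCE A (Python) =====
-- def get_symbol_message(symbols, bold=False):
--     symbol_message = []
--     for i, s in enumerate(symbols[::-1]):
--         if i == 1:
--             symbol_message.append("and")
--         elif i > 1:
--             symbol_message.append(",")
--
--         if bold:
--             symbol_message.append(f"**{s}**")
--         else:
--             symbol_message.append(s)
--
--     symbol_message = reversed(symbol_message)
--     symbol_message = " ".join(symbol_message)
--     symbol_message = symbol_message.replace(" ,", ",")
--
--     return symbol_message
-- ===== SOURCE B (Python) =====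
-- def get_symbol_message(symbols, bold=False):
--     items = [("**" + s + "**") if bold else s for s in symbols]
--     if len(items) == 0:
--         msg = ""
--     elif len(items) == 1:
--         msg = items[0]
--     else:
--         msg = " , ".join(items[:-1]) + " and " + items[-1]
--     return msg.replace(" ,", ",")
-- ===== Notes on version B (the rewrite author's own statement) =====
-- stated objective: simpler
-- what changed: Replaces A's reversed positional-token loop (index-dependent separators, re-reversal, space-join) with a forward comprehension plus a prefix-join-and-last decomposition, keeping the final ' ,'->',' replace.
import Mathlib
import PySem

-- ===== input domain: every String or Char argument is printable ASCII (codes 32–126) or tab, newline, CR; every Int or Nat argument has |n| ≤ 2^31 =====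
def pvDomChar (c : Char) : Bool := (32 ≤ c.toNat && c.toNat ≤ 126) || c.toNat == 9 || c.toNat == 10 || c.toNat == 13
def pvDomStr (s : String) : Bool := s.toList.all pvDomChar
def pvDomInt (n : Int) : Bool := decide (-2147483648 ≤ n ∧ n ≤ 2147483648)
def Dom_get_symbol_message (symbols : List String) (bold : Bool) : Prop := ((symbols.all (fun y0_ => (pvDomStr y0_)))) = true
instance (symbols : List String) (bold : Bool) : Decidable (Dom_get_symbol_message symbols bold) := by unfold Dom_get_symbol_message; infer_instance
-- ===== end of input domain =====

-- B replaces A's reversed positional-token loop by a forward comprehension plus prefix-join-and-last; simpler decomposition.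

-- ===== PORT A =====
def get_symbol_message (symbols : List String) (bold : Bool) : String :=
  -- symbols[::-1] = symbols.reverse (PySem.List.slice?_none_none_neg_one)
  let sm := (PySem.List.enumerate symbols.reverse 0).foldl
    (fun (acc : List String) (p : Int × String) =>
      let acc := if p.1 == 1 then acc ++ ["and"]
                 else if 1 < p.1 then acc ++ [","] else acc
      if bold then acc ++ ["**" ++ p.2 ++ "**"] else acc ++ [p.2]) []
  PySem.Str.replace (PySem.Str.join " " sm.reverse) " ," ","

-- ===== PORT B =====
def get_symbol_message_alt (symbols : List String) (bold : Bool) : String :=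
  let items := symbols.map (fun s => if bold then "**" ++ s ++ "**" else s)
  let msg :=
    if items.length == 0 then ""
    else if items.length == 1 then (PySem.List.pyGet? items 0).getD ""
    else PySem.Str.join " , " items.dropLast ++ " and " ++ (PySem.List.pyGet? items (-1)).getD ""
  PySem.Str.replace msg " ," ","

-- ===== PRECONDITION & SPEC =====
def Spec_get_symbol_message (symbols : List String) (bold : Bool) (out : String) : Prop := out = get_symbol_message_alt symbols bold
instance (symbols : List String) (bold : Bool) (out : String) : Decidable (Spec_get_symbol_message symbols bold out) := by unfold Spec_get_symbol_message; infer_instance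

-- ===== CLAIM (what is proved, stated in full; the proofs are below) =====
def Claim_equal_get_symbol_message : Prop := ∀ (symbols : List String) (bold : Bool), Dom_get_symbol_message symbols bold → Spec_get_symbol_message symbols bold (get_symbol_message symbols bold)

-- ===== LEMMAS AND PROOFS =====

set_option maxHeartbeats 1000000

-- the bold/plain decoration, shared shape of both ports' item strings
def pvDecor (bold : Bool) (t : String) : String := if bold then "**" ++ t ++ "**" else t

-- A's loop body
def pvStep (bold : Bool) (acc : List String) (p : Int × String) : List String :=
  let acc := if p.1 == 1 then acc ++ ["and"]
             else if 1 < p.1 then acc ++ [","] else acc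
  if bold then acc ++ ["**" ++ p.2 ++ "**"] else acc ++ [p.2]

theorem pvStep_eq (bold : Bool) :
    (fun (acc : List String) (p : Int × String) =>
      let acc := if p.1 == 1 then acc ++ ["and"]
                 else if 1 < p.1 then acc ++ [","] else acc
      if bold then acc ++ ["**" ++ p.2 ++ "**"] else acc ++ [p.2]) = pvStep bold := rfl

theorem pvDecor_eq (bold : Bool) :
    (fun (s : String) => if bold then "**" ++ s ++ "**" else s) = pvDecor bold := rfl

theorem pvStep_big (bold : Bool) (acc : List String) (k : Int) (t : String) (hk : 2 ≤ k) :
    pvStep bold acc (k, t) = acc ++ [",", pvDecor bold t] := by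
  have h1 : (k == 1) = false := by simp; omega
  have h2 : 1 < k := by omega
  cases bold <;> simp [pvStep, pvDecor, h1, h2]

-- the tail of A's loop (indices ≥ 2) appends "," then the item, for every element
theorem pv_tail_fold (bold : Bool) (l : List String) (acc : List String) (k : Int) (hk : 2 ≤ k) :
    (PySem.List.enumerate l k).foldl (pvStep bold) acc
    = acc ++ l.flatMap (fun t => [",", pvDecor bold t]) := by
  induction l generalizing acc k with
  | nil => simp [PySem.List.enumerate_nil]
  | cons x xs ih =>
    rw [PySem.List.enumerate_cons, List.foldl_cons, pvStep_big bold acc k x hk,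
      ih _ (k + 1) (by omega)]
    simp

theorem pvStep_zero (bold : Bool) (t : String) :
    pvStep bold [] (0, t) = [pvDecor bold t] := by cases bold <;> rfl

theorem pv_first_two (bold : Bool) (r s : String) :
    pvStep bold (pvStep bold [] (0, r)) (1, s) = [pvDecor bold r, "and", pvDecor bold s] := by
  cases bold <;> rfl

theorem pv_join_cons_of_ne (sep a : List Char) (l : List (List Char)) (h : l ≠ []) :
    PySem.Chars.join sep (a :: l) = a ++ sep ++ PySem.Chars.join sep l := by
  cases l with
  | nil => exact absurd rfl h
  | cons b m =>
    rw [PySem.Chars.join_cons_cons]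

-- joining item-comma pairs with sep = joining the items with sep,[,],sep, then sep w sep Z
theorem pv_chars_shift (sep w : List Char) (L : List (List Char)) (Y Z : List Char) :
    PySem.Chars.join sep (L.flatMap (fun t => [t, [',']]) ++ [Y, w, Z])
    = PySem.Chars.join (sep ++ [','] ++ sep) (L ++ [Y]) ++ (sep ++ w ++ sep ++ Z) := by
  induction L with
  | nil =>
    rw [List.flatMap_nil, List.nil_append, List.nil_append,
      PySem.Chars.join_cons_cons, PySem.Chars.join_cons_cons, PySem.Chars.join_singleton,
      PySem.Chars.join_singleton]
    simp [List.append_assoc]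
  | cons X L ih =>
    rw [List.flatMap_cons]
    simp only [List.cons_append, List.nil_append, List.append_assoc]
    rw [pv_join_cons_of_ne sep X _ (by simp),
      pv_join_cons_of_ne sep [','] _ (by rcases L with _ | _ <;> simp),
      ih,
      pv_join_cons_of_ne _ X (L ++ [Y]) (by simp)]
    simp [List.append_assoc]

theorem pv_map_toList_pairs (l : List String) :
    List.map String.toList (l.flatMap (fun t => [t, ","]))
    = (l.map String.toList).flatMap (fun t => [t, [',']]) := by
  induction l with
  | nil => rfl
  | cons a as ih => simp [ih, show ",".toList = [','] from rfl]

theorem pv_join_shift (l : List String) (y z : String) :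
    PySem.Str.join " " (l.flatMap (fun t => [t, ","]) ++ [y, "and", z])
    = PySem.Str.join " , " (l ++ [y]) ++ " and " ++ z := by
  apply String.toList_injective
  have h := pv_chars_shift (" ".toList) ("and".toList) (l.map String.toList) y.toList z.toList
  have hsep : " ".toList ++ [','] ++ " ".toList = " , ".toList := rfl
  rw [hsep] at h
  simp only [PySem.Str.toList_join, String.toList_append, List.map_append, List.map_cons,
    List.map_nil] at h ⊢
  rw [pv_map_toList_pairs l, h]
  have hand : " and ".toList = " ".toList ++ "and".toList ++ " ".toList := rfl
  rw [hand]
  simp [List.append_assoc]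

theorem pv_reverse_pairs (bold : Bool) (l : List String) :
    (l.flatMap (fun t => [",", pvDecor bold t])).reverse
    = (l.reverse.map (pvDecor bold)).flatMap (fun u => [u, ","]) := by
  induction l with
  | nil => rfl
  | cons x xs ih => simp [ih]

theorem pv_join_empty : PySem.Str.join " " ([] : List String) = "" := by
  apply String.toList_injective
  simp [PySem.Str.toList_join, PySem.Chars.join_nil]

theorem pv_join_single (x : String) : PySem.Str.join " " [x] = x := by
  apply String.toList_injective
  simp [PySem.Str.toList_join, PySem.Chars.join_singleton]

theorem get_symbol_message_eq (symbols : List String) (bold : Bool) :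
    get_symbol_message symbols bold = get_symbol_message_alt symbols bold := by
  simp only [get_symbol_message, get_symbol_message_alt, pvStep_eq bold, pvDecor_eq bold]
  refine congrArg (fun m => PySem.Str.replace m " ," ",") ?_
  rcases hrev : symbols.reverse with _ | ⟨r, _ | ⟨s, rest⟩⟩
  · have h0 : symbols = [] := by simpa using congrArg List.reverse hrev
    subst h0
    simp [PySem.List.enumerate_nil, pv_join_empty]
  · have h1 : symbols = [r] := by simpa using congrArg List.reverse hrev
    subst h1
    rw [PySem.List.enumerate_cons, PySem.List.enumerate_nil, List.foldl_cons,
      List.foldl_nil, pvStep_zero]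
    simp [pv_join_single]
  · have hs : symbols = rest.reverse ++ [s, r] := by
      simpa using congrArg List.reverse hrev
    rw [PySem.List.enumerate_cons, PySem.List.enumerate_cons, List.foldl_cons,
      List.foldl_cons, show ((0 : Int) + 1 = 1) from rfl, show ((1 : Int) + 1 = 2) from rfl,
      pv_tail_fold bold rest _ 2 (by omega), pv_first_two bold r s, hs]
    rw [List.reverse_append, pv_reverse_pairs]
    simp only [List.reverse_cons, List.reverse_nil, List.nil_append, List.cons_append,
      List.map_append, List.map_cons, List.map_nil]
    rw [pv_join_shift (rest.reverse.map (pvDecor bold)) (pvDecor bold s) (pvDecor bold r)]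
    have hlen : ((rest.reverse.map (pvDecor bold) ++ [pvDecor bold s, pvDecor bold r]).length == 0) = false := by
      simp
    have hlen1 : ((rest.reverse.map (pvDecor bold) ++ [pvDecor bold s, pvDecor bold r]).length == 1) = false := by
      simp
    rw [hlen, hlen1]
    simp only [Bool.false_eq_true, if_false]
    have hdl : (rest.reverse.map (pvDecor bold) ++ [pvDecor bold s, pvDecor bold r]).dropLast
        = rest.reverse.map (pvDecor bold) ++ [pvDecor bold s] := by
      rw [show (rest.reverse.map (pvDecor bold) ++ [pvDecor bold s, pvDecor bold r])
            = (rest.reverse.map (pvDecor bold) ++ [pvDecor bold s]) ++ [pvDecor bold r] by simp,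
        List.dropLast_concat]
    have hlast : PySem.List.pyGet? (rest.reverse.map (pvDecor bold) ++ [pvDecor bold s, pvDecor bold r]) (-1)
        = some (pvDecor bold r) := by
      rw [PySem.List.pyGet?_neg_one,
        show (rest.reverse.map (pvDecor bold) ++ [pvDecor bold s, pvDecor bold r])
            = (rest.reverse.map (pvDecor bold) ++ [pvDecor bold s]) ++ [pvDecor bold r] by simp,
        List.getLast?_concat]
    rw [hdl, hlast]
    rfl

-- ===== VERDICT (by name: the statement is the Claim_ definition above) =====
theorem get_symbol_message_spec : Claim_equal_get_symbol_message := by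
  intro symbols bold _
  exact get_symbol_message_eq symbols bold
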